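-- pv_equiv track=rewrite | github.com/ERATOMMSD/frenetic-lib | src/freneticlib/representations/cartesian_generator.py | points_to_deltas
-- ===== SOURCE A (Python) =====
-- def points_to_deltas(control_points):
--     x1, y1 = 0, 0
--     res = []
--     for x, y in control_points:
--         res.append((x - x1, y - y1))
--         x1 = x
--         y1 = y
--     return res
-- ===== SOURCE B (Python) =====
-- def points_to_deltas(control_points):
--     pts = list(control_points)
--
--     def solve(lo, hi, base):
--         # deltas of pts[lo:hi], the first one taken relative to base
--         n = hi - lo
--         if n == 0:
--             return []
--         if n == 1:
--             x, y = pts[lo]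
--             bx, by = base
--             return [(x - bx, y - by)]
--         mid = (lo + hi) // 2
--         return solve(lo, mid, base) + solve(mid, hi, pts[mid - 1])
--
--     return solve(0, len(pts), (0, 0))
-- ===== Notes on version B (the rewrite author's own statement) =====
-- stated objective: alternative
-- what changed: Replaces A's single left-to-right scan threading a previous-point accumulator with a divide-and-conquer recursion over index ranges: each half is solved independently, the right half's base point being the last point of the left half, and the two delta lists are concatenated.
import Mathlib
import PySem

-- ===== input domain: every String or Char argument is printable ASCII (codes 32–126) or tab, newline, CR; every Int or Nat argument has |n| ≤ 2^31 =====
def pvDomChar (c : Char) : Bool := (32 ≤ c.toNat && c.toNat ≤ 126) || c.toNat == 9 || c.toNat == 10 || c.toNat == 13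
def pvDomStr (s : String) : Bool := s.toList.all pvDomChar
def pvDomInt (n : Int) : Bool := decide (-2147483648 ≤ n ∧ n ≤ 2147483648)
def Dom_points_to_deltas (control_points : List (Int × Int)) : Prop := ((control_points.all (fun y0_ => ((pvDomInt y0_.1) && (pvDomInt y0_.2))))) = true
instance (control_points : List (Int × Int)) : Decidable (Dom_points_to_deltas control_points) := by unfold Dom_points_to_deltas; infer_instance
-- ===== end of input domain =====

-- B replaces A's accumulator-threading scan by a divide-and-conquer recursion over index ranges; alternative decomposition, same result.

-- ===== PORT A =====
-- A's loop threads (x1, y1) and appends to res: a foldl over the same state.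
def points_to_deltas (control_points : List (Int × Int)) : List (Int × Int) :=
  (control_points.foldl
    (fun (st : (Int × Int) × List (Int × Int)) (p : Int × Int) =>
      ((p.1, p.2), st.2 ++ [(p.1 - st.1.1, p.2 - st.1.2)]))
    ((0, 0), [])).2

-- ===== PORT B =====
-- Source B's solve(lo, hi, base): divide-and-conquer on the index range [lo, hi).
-- pts[i] is ported as getD (exact here: every index used is in range on every call reached from points_to_deltas_alt).
def pvSolve (pts : List (Int × Int)) (lo hi : Nat) (base : Int × Int) : List (Int × Int) :=
  if hi - lo = 0 then []
  else if hi - lo = 1 then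
    let p := pts.getD lo (0, 0)
    [(p.1 - base.1, p.2 - base.2)]
  else
    let mid := (lo + hi) / 2  -- (lo + hi) // 2 on nonnegative ints: Nat division is exact here
    pvSolve pts lo mid base ++ pvSolve pts mid hi (pts.getD (mid - 1) (0, 0))
termination_by hi - lo
decreasing_by all_goals omega

def points_to_deltas_alt (control_points : List (Int × Int)) : List (Int × Int) :=
  pvSolve control_points 0 control_points.length (0, 0)

-- ===== PRECONDITION & SPEC =====
def Spec_points_to_deltas (control_points : List (Int × Int)) (out : List (Int × Int)) : Prop := out = points_to_deltas_alt control_points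
instance (control_points : List (Int × Int)) (out : List (Int × Int)) : Decidable (Spec_points_to_deltas control_points out) := by unfold Spec_points_to_deltas; infer_instance

-- ===== CLAIM (what is proved, stated in full; the proofs are below) =====
def Claim_equal_points_to_deltas : Prop := ∀ (control_points : List (Int × Int)), Dom_points_to_deltas control_points → Spec_points_to_deltas control_points (points_to_deltas control_points)

-- ===== LEMMAS AND PROOFS =====
-- Reference form: consecutive deltas starting from base.
def pvDeltasFrom (base : Int × Int) : List (Int × Int) → List (Int × Int)
  | [] => []
  | p :: rest => (p.1 - base.1, p.2 - base.2) :: pvDeltasFrom p rest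

theorem pvA_loop (pts : List (Int × Int)) (p : Int × Int) (acc : List (Int × Int)) :
    (pts.foldl
      (fun (st : (Int × Int) × List (Int × Int)) (q : Int × Int) =>
        ((q.1, q.2), st.2 ++ [(q.1 - st.1.1, q.2 - st.1.2)]))
      (p, acc)).2
    = acc ++ pvDeltasFrom p pts := by
  induction pts generalizing p acc with
  | nil => simp [pvDeltasFrom]
  | cons q rest ih => simp [pvDeltasFrom, ih]

theorem pvDeltasFrom_append (l1 l2 : List (Int × Int)) (base : Int × Int) (h : l1 ≠ []) :
    pvDeltasFrom base (l1 ++ l2)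
      = pvDeltasFrom base l1 ++ pvDeltasFrom (l1.getLast h) l2 := by
  induction l1 generalizing base with
  | nil => simp at h
  | cons p rest ih =>
    cases rest with
    | nil => simp [pvDeltasFrom]
    | cons q r =>
      have hne : q :: r ≠ [] := by simp
      rw [show (p :: q :: r) ++ l2 = p :: ((q :: r) ++ l2) by simp,
        pvDeltasFrom, pvDeltasFrom, ih p hne, List.getLast_cons hne]
      simp

theorem pvSolve_eq (pts : List (Int × Int)) (lo hi : Nat) (base : Int × Int)
    (hle : lo ≤ hi) (hlen : hi ≤ pts.length) :
    pvSolve pts lo hi base = pvDeltasFrom base ((pts.drop lo).take (hi - lo)) := by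
  by_cases h0 : hi - lo = 0
  · rw [pvSolve]
    simp [h0, pvDeltasFrom]
  · by_cases h1 : hi - lo = 1
    · rw [pvSolve]
      have hlt : lo < pts.length := by omega
      have hdrop : pts.drop lo = pts[lo] :: pts.drop (lo + 1) :=
        List.drop_eq_getElem_cons hlt
      have hget : pts.getD lo (0, 0) = pts[lo] := List.getD_eq_getElem _ _ hlt
      simp only [h1, hget]
      rw [if_neg (by decide), if_pos trivial, hdrop]
      rfl
    · rw [pvSolve]
      simp only [h0, h1, if_false]
      set mid := (lo + hi) / 2 with hmid
      have hm1 : lo < mid := by omega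
      have hm2 : mid < hi := by omega
      have ihl := pvSolve_eq pts lo mid base (by omega) (by omega)
      have ihr := pvSolve_eq pts mid hi (pts.getD (mid - 1) (0, 0)) (by omega) (by omega)
      rw [ihl, ihr]
      -- split the segment [lo, hi) at mid
      have hseg : (pts.drop lo).take (hi - lo)
          = (pts.drop lo).take (mid - lo) ++ (pts.drop mid).take (hi - mid) := by
        have : hi - lo = (mid - lo) + (hi - mid) := by omega
        have hdd : (pts.drop lo).drop (mid - lo) = pts.drop mid := by
          rw [List.drop_drop]; congr 1; omega
        rw [this, List.take_add, hdd]
      have hne : (pts.drop lo).take (mid - lo) ≠ [] := by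
        have : ((pts.drop lo).take (mid - lo)).length = mid - lo := by
          simp; omega
        intro hc; rw [hc] at this; simp at this; omega
      rw [hseg, pvDeltasFrom_append _ _ _ hne]
      congr 1
      -- the last element of the left segment is pts[mid-1]
      have hlast : ((pts.drop lo).take (mid - lo)).getLast hne = pts.getD (mid - 1) (0, 0) := by
        have hlenl : ((pts.drop lo).take (mid - lo)).length = mid - lo := by
          simp; omega
        have hm1lt : mid - 1 < pts.length := by omega
        rw [List.getLast_eq_getElem]
        simp only [hlenl]
        rw [List.getElem_take, List.getElem_drop,
          List.getD_eq_getElem?_getD, List.getElem?_eq_getElem hm1lt]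
        congr 1
        omega
      rw [hlast]
termination_by hi - lo
decreasing_by all_goals omega

-- ===== VERDICT (by name: the statement is the Claim_ definition above) =====
theorem points_to_deltas_spec : Claim_equal_points_to_deltas := by
  intro cps _
  show _ = _
  rw [points_to_deltas, points_to_deltas_alt,
    pvSolve_eq cps 0 cps.length (0, 0) (Nat.zero_le _) le_rfl]
  simpa using pvA_loop cps (0, 0) []
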